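-- pv_equiv track=rewrite | github.com/ltyaqi/PFDF | main/fed_tree.py | splitdataset1
-- ===== SOURCE A (Python) =====
-- def splitdataset1(dataset, label, value):
--     #keep label_values
--     n=len(dataset[label])
--     retdataset={}
--     d_index=[]
--     for i in range(n):
--         if dataset[label][i] == value:
--             d_index.append(i)
--     for l_v in dataset:
--         retdataset[l_v]=[dataset[l_v][j] for j in d_index]
--     return retdataset
-- ===== SOURCE B (Python) =====
-- def splitdataset1(dataset, label, value):
--     retdataset = {col: [] for col in dataset}
--     labels = dataset[label]
--     for i in range(len(labels)):
--         if labels[i] == value: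
--             for col in dataset:
--                 retdataset[col].append(dataset[col][i])
--     return retdataset
-- ===== Notes on version B (the rewrite author's own statement) =====
-- stated objective: simpler
-- what changed: B drops A's precomputed d_index list and replaces the scan-then-column-major-copy with a single row-major pass that appends each matching row's element to every column's output list at once.
import Mathlib
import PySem

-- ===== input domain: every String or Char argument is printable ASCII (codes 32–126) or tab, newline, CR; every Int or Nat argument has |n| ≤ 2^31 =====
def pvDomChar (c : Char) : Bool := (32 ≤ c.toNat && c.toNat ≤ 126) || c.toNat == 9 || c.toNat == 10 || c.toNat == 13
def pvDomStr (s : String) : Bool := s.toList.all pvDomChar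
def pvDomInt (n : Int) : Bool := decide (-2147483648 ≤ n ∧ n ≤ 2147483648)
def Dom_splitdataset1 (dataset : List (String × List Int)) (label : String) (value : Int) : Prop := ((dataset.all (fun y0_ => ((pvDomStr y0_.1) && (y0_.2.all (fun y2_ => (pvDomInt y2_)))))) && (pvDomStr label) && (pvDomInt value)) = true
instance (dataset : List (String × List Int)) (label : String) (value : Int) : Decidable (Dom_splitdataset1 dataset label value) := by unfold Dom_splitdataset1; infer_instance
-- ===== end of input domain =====

-- B replaces A's two column-major passes over a precomputed index list by a single row-major pass
-- that appends each matching row to every column at once (simpler decomposition, no d_index list).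

-- ===== PORT A =====
def splitdataset1 (dataset : List (String × List Int)) (label : String) (value : Int) : List (String × List Int) :=
  let d := PySem.Dict.mk dataset
  let labelcol := d.getD label []           -- dataset[label]; Pre_ guarantees the key exists
  let n := labelcol.length
  let d_index : List Int := (PySem.List.pyRange 0 (n : Int) 1).foldl
      (fun acc i => if PySem.List.pyGet? labelcol i = some value then acc ++ [i] else acc) []
  let ret := d.keys.foldl
      (fun (r : PySem.Dict String (List Int)) k =>
        r.insert k (d_index.map (fun j => PySem.List.pyGetD (d.getD k []) j 0)))   -- pyGetD: in range under Pre_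
      PySem.Dict.empty
  ret.items

-- ===== PORT B =====
def splitdataset1_alt (dataset : List (String × List Int)) (label : String) (value : Int) : List (String × List Int) :=
  let d := PySem.Dict.mk dataset
  let ret0 : PySem.Dict String (List Int) :=
    d.keys.foldl (fun r k => r.insert k ([] : List Int)) PySem.Dict.empty
  let labels := d.getD label []             -- dataset[label]; Pre_ guarantees the key exists
  let ret := (PySem.List.pyRange 0 (labels.length : Int) 1).foldl
      (fun r i =>
        if PySem.List.pyGet? labels i = some value then
          d.keys.foldl
            (fun r2 k => r2.modify k [] (fun xs => xs ++ [PySem.List.pyGetD (d.getD k []) i 0]))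
            r
        else r)
      ret0
  ret.items

-- ===== PRECONDITION & SPEC =====
-- Pre_ excludes: a label that is not a key (Python KeyError), a matching row index that is out of
-- range for some column (Python IndexError), and duplicate keys, which a Python dict cannot carry.
def Pre_splitdataset1 (dataset : List (String × List Int)) (label : String) (value : Int) : Prop :=
  (dataset.map Prod.fst).Nodup ∧
  label ∈ dataset.map Prod.fst ∧
  ∀ p ∈ dataset, ∀ i : Nat, i < ((PySem.Dict.mk dataset).getD label []).length →
    ((PySem.Dict.mk dataset).getD label [])[i]? = some value → i < p.2.length
instance (dataset : List (String × List Int)) (label : String) (value : Int) : Decidable (Pre_splitdataset1 dataset label value) := by unfold Pre_splitdataset1; infer_instance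

def pvWitness_splitdataset1 : (List (String × List Int)) × String × Int :=
  ([("a", [1, 2, 1]), ("b", [3, 4, 5])], "a", 1)

def Spec_splitdataset1 (dataset : List (String × List Int)) (label : String) (value : Int) (out : List (String × List Int)) : Prop := out = splitdataset1_alt dataset label value
instance (dataset : List (String × List Int)) (label : String) (value : Int) (out : List (String × List Int)) : Decidable (Spec_splitdataset1 dataset label value out) := by unfold Spec_splitdataset1; infer_instance

-- ===== CLAIM (what is proved, stated in full; the proofs are below) =====
def Claim_equal_splitdataset1 : Prop := ∀ (dataset : List (String × List Int)) (label : String) (value : Int), Dom_splitdataset1 dataset label value → Pre_splitdataset1 dataset label value → Spec_splitdataset1 dataset label value (splitdataset1 dataset label value)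

-- ===== LEMMAS AND PROOFS =====

-- getD after B's inner per-row fold: the matching row element is appended at every key (once, by Nodup).
lemma getD_inner_fold (x : String → Int) (ks : List String) (hnd : ks.Nodup)
    (r : PySem.Dict String (List Int)) (c : String) :
    (ks.foldl (fun r2 k => r2.modify k [] (fun xs => xs ++ [x k])) r).getD c []
      = if c ∈ ks then r.getD c [] ++ [x c] else r.getD c [] := by
  induction ks generalizing r with
  | nil => simp
  | cons k ks ih =>
    simp only [List.foldl_cons]
    rw [ih (List.Nodup.of_cons hnd)]
    rcases List.nodup_cons.mp hnd with ⟨hk, _⟩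
    by_cases hc : c ∈ ks
    · have hne : c ≠ k := fun h => hk (h ▸ hc)
      rw [PySem.Dict.getD_modify_of_ne r [] _ hne]
      simp [hc]
    · by_cases hck : c = k
      · subst hck
        simp [hc, PySem.Dict.getD_modify_self]
      · rw [PySem.Dict.getD_modify_of_ne r [] _ hck]
        simp [hc, hck]

-- getD after B's outer row loop: the column at c collects exactly the matching rows, in order.
lemma getD_outer_fold (labels : List Int) (value : Int) (g : String → Int → Int)
    (ks : List String) (hnd : ks.Nodup) (is : List Int)
    (r : PySem.Dict String (List Int)) (c : String) (hc : c ∈ ks) :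
    (is.foldl
        (fun r i =>
          if PySem.List.pyGet? labels i = some value then
            ks.foldl (fun r2 k => r2.modify k [] (fun xs => xs ++ [g k i])) r
          else r)
        r).getD c []
      = r.getD c [] ++
        (is.filter (fun i => decide (PySem.List.pyGet? labels i = some value))).map (g c) := by
  induction is generalizing r with
  | nil => simp
  | cons i is ih =>
    simp only [List.foldl_cons, List.filter_cons]
    by_cases hi : PySem.List.pyGet? labels i = some value
    · rw [if_pos hi, ih, getD_inner_fold _ ks hnd, if_pos hc]
      simp [hi]
    · rw [if_neg hi, ih]
      simp [hi]

-- the key set is preserved by B's row loop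
lemma keys_outer_fold (labels : List Int) (value : Int) (g : String → Int → Int)
    (ks : List String) (is : List Int)
    (r : PySem.Dict String (List Int)) (hkeys : r.keys = ks) :
    (is.foldl
        (fun r i =>
          if PySem.List.pyGet? labels i = some value then
            ks.foldl (fun r2 k => r2.modify k [] (fun xs => xs ++ [g k i])) r
          else r)
        r).keys = ks := by
  induction is generalizing r with
  | nil => simpa using hkeys
  | cons i is ih =>
    simp only [List.foldl_cons]
    by_cases hi : PySem.List.pyGet? labels i = some value
    · rw [if_pos hi]
      apply ih
      rw [PySem.Dict.keys_foldl_modify, hkeys, PySem.Set.update_eq_append_filter]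
      have hfil : (PySem.Set.ofList ks).filter (fun y => !(PySem.Set.contains ks y)) = [] := by
        apply List.filter_eq_nil_iff.mpr
        intro a ha
        simpa using (PySem.Set.mem_ofList ks a).mp ha
      rw [hfil, List.append_nil]
    · rw [if_neg hi]
      exact ih r hkeys

-- getD on B's initial all-empty dict is [] everywhere
lemma getD_init_fold (ks : List String) (r : PySem.Dict String (List Int)) (c : String)
    (hr : r.getD c [] = []) :
    (ks.foldl (fun r k => r.insert k ([] : List Int)) r).getD c [] = [] := by
  induction ks generalizing r with
  | nil => simpa using hr
  | cons k ks ih =>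
    simp only [List.foldl_cons]
    apply ih
    rw [PySem.Dict.getD_insert]
    split_ifs <;> simp [hr]

-- ===== VERDICT (by name: the statement is the Claim_ definition above) =====
theorem splitdataset1_spec : Claim_equal_splitdataset1 := by
  intro dataset label value _hdom hpre
  obtain ⟨hnd, -, -⟩ := hpre
  unfold Spec_splitdataset1 splitdataset1 splitdataset1_alt
  simp only []
  set d := PySem.Dict.mk dataset with hd
  have hkeys : d.keys = dataset.map Prod.fst := rfl
  have hndk : d.keys.Nodup := by rw [hkeys]; exact hnd
  set labels := d.getD label [] with hlabels
  set P : Int → Bool := fun i => decide (PySem.List.pyGet? labels i = some value) with hP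
  set g : String → Int → Int := fun k i => PySem.List.pyGetD (d.getD k []) i 0 with hg
  -- A's index list is the filtered range
  have hdix : (PySem.List.pyRange 0 (labels.length : Int) 1).foldl
      (fun acc i => if PySem.List.pyGet? labels i = some value then acc ++ [i] else acc) []
      = (PySem.List.pyRange 0 (labels.length : Int) 1).filter P := by
    rw [PySem.List.foldl_append_ite_eq_filter]
    rfl
  rw [hdix]
  -- A's result: fresh distinct inserts from empty append the per-key selections
  rw [show (fun (r : PySem.Dict String (List Int)) k =>
        r.insert k (((PySem.List.pyRange 0 (labels.length : Int) 1).filter P).map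
          (fun j => PySem.List.pyGetD (d.getD k []) j 0)))
      = (fun (r : PySem.Dict String (List Int)) a =>
        r.insert (id a) (((PySem.List.pyRange 0 (labels.length : Int) 1).filter P).map (g a)))
      from rfl]
  rw [PySem.Dict.items_foldl_insert_fresh d.keys id
        (fun a => ((PySem.List.pyRange 0 (labels.length : Int) 1).filter P).map (g a))
        PySem.Dict.empty (fun a _ => PySem.Dict.contains_empty a) (by simpa using hndk)]
  -- B's result
  set ret0 : PySem.Dict String (List Int) :=
    d.keys.foldl (fun r k => r.insert k ([] : List Int)) PySem.Dict.empty with hret0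
  have hret0keys : ret0.keys = d.keys := by
    rw [hret0, PySem.Dict.keys_foldl_insert, PySem.Dict.keys_empty,
        PySem.Set.update_nil_left, PySem.Set.ofList_eq_self_of_nodup d.keys hndk]
  set retB := (PySem.List.pyRange 0 (labels.length : Int) 1).foldl
      (fun r i =>
        if PySem.List.pyGet? labels i = some value then
          d.keys.foldl (fun r2 k => r2.modify k [] (fun xs => xs ++ [g k i])) r
        else r)
      ret0 with hretB
  have hBkeys : retB.keys = d.keys :=
    keys_outer_fold labels value g d.keys _ ret0 hret0keys
  have hBnd : retB.keys.Nodup := by rw [hBkeys]; exact hndk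
  rw [PySem.Dict.items_eq_map_keys retB hBnd [], hBkeys]
  simp only [PySem.Dict.empty, List.nil_append, id]
  apply List.map_congr_left
  intro k hk
  have : retB.getD k [] =
      ret0.getD k [] ++ ((PySem.List.pyRange 0 (labels.length : Int) 1).filter P).map (g k) := by
    rw [hretB]
    exact getD_outer_fold labels value g d.keys hndk _ ret0 k hk
  rw [this, getD_init_fold d.keys PySem.Dict.empty k (by simp)]
  simp
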